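-- pv_equiv track=rewrite | github.com/pypi-data/pypi-mirror-386 | packages/riggery/riggery-0.1.tar.gz/riggery-0.1/src/riggery/core/lib/nurbsutil.py | cvsToAnchorGroups
-- ===== SOURCE A (Python) =====
-- from typing import Literal, Union, Iterable, Generator
--
-- def numCVsValidForBezier(numCVs:int) -> bool:
--     """
--     Assumes a degree 3 NURBS curve.
--
--     :param numCVs: the number of CVs
--     :return: True if the number of CVs can yield a clean bezier.
--     """
--     if numCVs >= 4:
--         if (numCVs-4) % 3:
--             return False
--         return True
--     return False
--
-- def anchorIndexToCVIndex(anchorIndex:int) -> int: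
--     """
--     For degree 3 beziers.
--
--     :param anchorIndex: the index of the bezier anchor
--     :return: The index of the central anchor CV.
--     """
--     return ((anchorIndex + 2) * 3) - 6
--
-- def numCVsToNumAnchors(numCVs:int) -> int:
--     """
--     For degree 3 beziers.
--
--     :param numCVs: the number of CVs
--     :return: The number of bezier anchors.
--     """
--     return ((numCVs - 4) // 3) + 2
--
-- def cvsToAnchorGroups(cvs:Iterable) -> Generator[dict, None, None]:
--     """
--     Yields dictionaries, where each dictionary has two or more of these keys:
--     'in', 'anchor', 'out'.
--
--     :param cvs: a list of CV indices, points, plugs, or whatever.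
--     :raises ValueError: Invalid number of CVs for a bezier.
--     """
--     out = []
--     cvs = list(cvs)
--     numCVs = len(cvs)
--     if numCVsValidForBezier(numCVs):
--         for anchorIndex in range(numCVsToNumAnchors(len(cvs))):
--             bundle = {}
--             origin = anchorIndexToCVIndex(anchorIndex)
--             if anchorIndex > 0:
--                 bundle['in'] = cvs[origin-1]
--             bundle['anchor'] = cvs[origin]
--             try:
--                 bundle['out'] = cvs[origin+1]
--             except IndexError:
--                 pass
--             yield bundle
--     else:
--         raise ValueError("invalid number of CVs")
-- ===== SOURCE B (Python) =====
-- from typing import Iterable, Generator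
--
-- def cvsToAnchorGroups(cvs: Iterable) -> Generator[dict, None, None]:
--     """Single streaming pass: one running bundle, no index arithmetic."""
--     cvs = list(cvs)
--     n = len(cvs)
--     if n < 4 or (n - 4) % 3:
--         raise ValueError("invalid number of CVs")
--     bundle = {}
--     for i, cv in enumerate(cvs):
--         r = i % 3
--         if r == 0:
--             bundle['anchor'] = cv
--         elif r == 1:
--             bundle['out'] = cv
--         else:
--             yield bundle
--             bundle = {'in': cv}
--     yield bundle
-- ===== Notes on version B (the rewrite author's own statement) =====
-- stated objective: simpler
-- what changed: Replaced the anchor-index loop with its cvIndex arithmetic, bounds helper calls and try/except by a single streaming pass over enumerate(cvs) that maintains one running bundle keyed by i % 3.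
import Mathlib
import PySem

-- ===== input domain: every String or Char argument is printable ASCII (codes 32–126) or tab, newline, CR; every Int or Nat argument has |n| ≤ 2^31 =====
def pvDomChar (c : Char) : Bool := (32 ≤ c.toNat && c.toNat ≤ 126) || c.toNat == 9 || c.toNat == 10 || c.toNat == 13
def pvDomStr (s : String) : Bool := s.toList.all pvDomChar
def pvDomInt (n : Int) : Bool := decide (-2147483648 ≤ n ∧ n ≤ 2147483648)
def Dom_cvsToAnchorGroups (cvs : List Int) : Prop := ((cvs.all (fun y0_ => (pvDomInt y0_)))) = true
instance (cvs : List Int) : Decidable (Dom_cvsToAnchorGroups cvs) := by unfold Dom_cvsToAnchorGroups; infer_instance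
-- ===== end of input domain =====

-- B replaces A's anchor-index loop (index arithmetic helpers + try/except) by a single
-- streaming pass over enumerate(cvs) keyed by i % 3; objective: simpler.
-- Equivalence is about the yielded sequence (both are generators that raise ValueError
-- on an invalid CV count; those inputs are excluded by Pre_).

-- ===== PORT A =====
def numCVsValidForBezier (numCVs : Int) : Bool :=
  if numCVs ≥ 4 then
    if PySem.Int.mod (numCVs - 4) 3 ≠ 0 then false else true
  else false

def anchorIndexToCVIndex (anchorIndex : Int) : Int :=
  ((anchorIndex + 2) * 3) - 6

def numCVsToNumAnchors (numCVs : Int) : Int :=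
  PySem.Int.floordiv (numCVs - 4) 3 + 2

-- the bundle one loop iteration of A builds (dict assignments with fresh keys = append);
-- pyGetD for cvs[origin-1]/cvs[origin]: in range whenever the valid-count branch is taken,
-- pyGet? + match for the try/except around cvs[origin+1]
def pvBundleA (cvs : List Int) (anchorIndex : Int) : List (String × Int) :=
  let origin := anchorIndexToCVIndex anchorIndex
  let bundle : List (String × Int) :=
    if anchorIndex > 0 then [("in", PySem.List.pyGetD cvs (origin - 1) 0)] else []
  let bundle := bundle ++ [("anchor", PySem.List.pyGetD cvs origin 0)]
  match PySem.List.pyGet? cvs (origin + 1) with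
  | some v => bundle ++ [("out", v)]
  | none => bundle

def cvsToAnchorGroups (cvs : List Int) : List (List (String × Int)) :=
  let numCVs : Int := cvs.length
  if numCVsValidForBezier numCVs then
    (PySem.List.pyRange 0 (numCVsToNumAnchors cvs.length) 1).foldl
      (fun out anchorIndex => out ++ [pvBundleA cvs anchorIndex]) []
  else []  -- Python raises ValueError here; excluded by Pre_

-- ===== PORT B =====
-- the streaming loop of Source B: state = (yielded so far, running bundle, index i)
def pvAltGo (out : List (List (String × Int))) (bundle : List (String × Int))
    (i : Nat) : List Int → List (List (String × Int))
  | [] => out ++ [bundle]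
  | cv :: rest =>
    let r := i % 3
    if r = 0 then pvAltGo out (bundle ++ [("anchor", cv)]) (i + 1) rest
    else if r = 1 then pvAltGo out (bundle ++ [("out", cv)]) (i + 1) rest
    else pvAltGo (out ++ [bundle]) [("in", cv)] (i + 1) rest

def cvsToAnchorGroups_alt (cvs : List Int) : List (List (String × Int)) :=
  let n : Int := cvs.length
  if n < 4 ∨ PySem.Int.mod (n - 4) 3 ≠ 0 then []  -- Python raises ValueError; excluded by Pre_
  else pvAltGo [] [] 0 cvs

-- ===== PRECONDITION & SPEC =====
-- Pre_ excludes exactly the inputs on which both generators raise ValueError: an invalid CV count.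
def Pre_cvsToAnchorGroups (cvs : List Int) : Prop :=
  4 ≤ cvs.length ∧ (cvs.length - 4) % 3 = 0
instance (cvs : List Int) : Decidable (Pre_cvsToAnchorGroups cvs) := by
  unfold Pre_cvsToAnchorGroups; infer_instance
def pvWitness_cvsToAnchorGroups : List Int := [10, 20, 30, 40]

def Spec_cvsToAnchorGroups (cvs : List Int) (out : List (List (String × Int))) : Prop := out = cvsToAnchorGroups_alt cvs
instance (cvs : List Int) (out : List (List (String × Int))) : Decidable (Spec_cvsToAnchorGroups cvs out) := by unfold Spec_cvsToAnchorGroups; infer_instance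

-- ===== CLAIM (what is proved, stated in full; the proofs are below) =====
def Claim_equal_cvsToAnchorGroups : Prop := ∀ (cvs : List Int), Dom_cvsToAnchorGroups cvs → Pre_cvsToAnchorGroups cvs → Spec_cvsToAnchorGroups cvs (cvsToAnchorGroups cvs)

-- ===== LEMMAS AND PROOFS =====

-- the common chunk shape both programs produce: one group per anchor, peeling three CVs at a time
def pvGroups : List (String × Int) → List Int → List (List (String × Int))
  | pre, [a] => [pre ++ [("anchor", a)]]
  | pre, a :: b :: c :: rest => (pre ++ [("anchor", a), ("out", b)]) :: pvGroups [("in", c)] rest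
  | _, _ => []

-- B's loop computes pvGroups
theorem pvAltGo_eq_groups : ∀ (k : Nat) (xs : List Int) (out : List (List (String × Int)))
    (pre : List (String × Int)) (i : Nat), i % 3 = 0 → xs.length = 3 * k + 1 →
    pvAltGo out pre i xs = out ++ pvGroups pre xs := by
  intro k
  induction k with
  | zero =>
    intro xs out pre i hi hx
    match xs, hx with
    | [a], _ =>
      simp [pvAltGo, pvGroups, hi]
  | succ k ih =>
    intro xs out pre i hi hx
    match xs, hx with
    | a :: b :: c :: rest, hx =>
      have hr : rest.length = 3 * k + 1 := by
        simp only [List.length_cons] at hx; omega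
      have h1 : (i + 1) % 3 = 1 := by omega
      have h2 : (i + 1 + 1) % 3 = 2 := by omega
      have h3 : (i + 1 + 1 + 1) % 3 = 0 := by omega
      simp only [pvAltGo, hi, h1, h2]
      norm_num
      rw [ih rest _ _ _ h3 hr]
      simp [pvGroups]

-- index shifting for the A side: the per-anchor view after the first anchor
def pvG (ys : List Int) (t : Nat) : List (String × Int) :=
  [("in", PySem.List.pyGetD ys ((3 * t : Nat) : Int) 0),
   ("anchor", PySem.List.pyGetD ys ((3 * t + 1 : Nat) : Int) 0)] ++
    (match PySem.List.pyGet? ys ((3 * t + 2 : Nat) : Int) with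
     | some v => [("out", v)]
     | none => [])

theorem pvG_shift (x y z : Int) (ws : List Int) (t : Nat) :
    pvG (x :: y :: z :: ws) (t + 1) = pvG ws t := by
  unfold pvG
  rw [show (3 * (t + 1) + 2) = (3 * t + 2) + 1 + 1 + 1 by omega,
      show (3 * (t + 1) + 1) = (3 * t + 1) + 1 + 1 + 1 by omega,
      show (3 * (t + 1)) = (3 * t) + 1 + 1 + 1 by omega]
  simp only [PySem.List.pyGetD_natCast, PySem.List.pyGet?_natCast, List.getD_cons_succ,
    List.getElem?_cons_succ]

theorem pvG_groups : ∀ (k : Nat) (c : Int) (rest : List Int), rest.length = 3 * k + 1 →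
    (List.range (k + 1)).map (fun t => pvG (c :: rest) t) = pvGroups [("in", c)] rest := by
  intro k
  induction k with
  | zero =>
    intro c rest hx
    match rest, hx with
    | [d], _ =>
      norm_num [pvG, pvGroups, PySem.List.pyGetD_ofNat', PySem.List.pyGet?_of_nonneg, show Int.toNat 2 = 2 from rfl, show Int.toNat 1 = 1 from rfl,
        PySem.List.pyGetD_natCast, PySem.List.pyGet?_natCast]
  | succ k ih =>
    intro c rest hx
    match rest, hx with
    | a :: b :: c' :: rest', hx =>
      have hr : rest'.length = 3 * k + 1 := by
        simp only [List.length_cons] at hx; omega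
      rw [List.range_succ_eq_map, List.map_cons, List.map_map]
      have head : pvG (c :: a :: b :: c' :: rest') 0 =
          [("in", c), ("anchor", a), ("out", b)] := by
        norm_num [pvG, PySem.List.pyGetD_ofNat', PySem.List.pyGet?_of_nonneg, show Int.toNat 2 = 2 from rfl, show Int.toNat 1 = 1 from rfl,
          PySem.List.pyGetD_natCast, PySem.List.pyGet?_natCast]
      have hfun : ((fun t => pvG (c :: a :: b :: c' :: rest') t) ∘ (· + 1)) =
          (fun t => pvG (c' :: rest') t) := by
        funext t; exact pvG_shift c a b _ t
      rw [hfun, ih c' rest' hr, head]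
      simp [pvGroups]

-- A's bundle after the first anchor is the shifted view
theorem pvBundleA_succ (a b : Int) (ys : List Int) (j : Nat) :
    pvBundleA (a :: b :: ys) ((j : Int) + 1) = pvG ys j := by
  unfold pvBundleA pvG anchorIndexToCVIndex
  have hpos : ((j : Int) + 1) > 0 := by omega
  simp only [hpos, if_true]
  have e1 : (((j : Int) + 1 + 2) * 3 - 6 - 1) = ((3 * j + 2 : Nat) : Int) := by push_cast; ring
  have e2 : (((j : Int) + 1 + 2) * 3 - 6) = ((3 * j + 3 : Nat) : Int) := by push_cast; ring
  have e3 : (((j : Int) + 1 + 2) * 3 - 6 + 1) = ((3 * j + 4 : Nat) : Int) := by push_cast; ring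
  rw [e1, e3, e2]
  rw [show (3 * j + 2) = (3 * j) + 1 + 1 by omega,
      show (3 * j + 3) = (3 * j + 1) + 1 + 1 by omega,
      show (3 * j + 4) = (3 * j + 2) + 1 + 1 by omega]
  simp only [PySem.List.pyGetD_natCast, PySem.List.pyGet?_natCast, List.getD_cons_succ,
    List.getElem?_cons_succ]
  rw [show 3 * j + 1 + 1 = 3 * j + 2 by omega]
  cases ys[3 * j + 2]? <;> simp

theorem pvBundleA_zero (a b : Int) (ys : List Int) :
    pvBundleA (a :: b :: ys) 0 = [("anchor", a), ("out", b)] := by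
  norm_num [pvBundleA, anchorIndexToCVIndex, PySem.List.pyGetD_ofNat',
    PySem.List.pyGet?_of_nonneg, show Int.toNat 2 = 2 from rfl, show Int.toNat 1 = 1 from rfl, PySem.List.pyGetD_zero]

-- A computes pvGroups [] cvs on every valid CV count
theorem pvA_eq_groups (k : Nat) (cvs : List Int) (hx : cvs.length = 3 * k + 4) :
    cvsToAnchorGroups cvs = pvGroups [] cvs := by
  match cvs, hx with
  | a :: b :: c :: rest, hx =>
    have hr : rest.length = 3 * k + 1 := by
      simp only [List.length_cons] at hx; omega
    have hlen : ((a :: b :: c :: rest).length : Int) = ((3 * k + 4 : Nat) : Int) := by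
      rw [hx]
    have hvalid : numCVsValidForBezier ((a :: b :: c :: rest).length : Int) = true := by
      unfold numCVsValidForBezier
      rw [hlen, show ((3 * k + 4 : Nat) : Int) - 4 = ((3 * k : Nat) : Int) by push_cast; ring]
      have h3 : PySem.Int.mod ((3 * k : Nat) : Int) ((3 : Nat) : Int) = ((3 * k % 3 : Nat) : Int) :=
        PySem.Int.mod_natCast (3 * k) 3
      simp only [Nat.cast_ofNat] at h3
      simp
    have hm : numCVsToNumAnchors ((a :: b :: c :: rest).length : Int) = ((k + 2 : Nat) : Int) := by
      unfold numCVsToNumAnchors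
      rw [hlen, show ((3 * k + 4 : Nat) : Int) - 4 = ((3 * k : Nat) : Int) by push_cast; ring]
      have h3 : PySem.Int.floordiv ((3 * k : Nat) : Int) ((3 : Nat) : Int) =
          ((3 * k / 3 : Nat) : Int) := PySem.Int.floordiv_natCast (3 * k) 3
      simp only [Nat.cast_ofNat] at h3
      rw [h3]
      push_cast
      omega
    unfold cvsToAnchorGroups
    simp only [hvalid, if_true, hm]
    rw [PySem.List.pyRange_zero_natCast]
    rw [PySem.List.foldl_append_singleton_eq_map]
    simp only [List.map_map, List.nil_append]
    rw [List.range_succ_eq_map, List.map_cons, List.map_map]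
    have head : ((fun anchorIndex => pvBundleA (a :: b :: c :: rest) anchorIndex) ∘
        (fun k : Nat => (k : Int))) 0 = [("anchor", a), ("out", b)] := by
      simpa using pvBundleA_zero a b (c :: rest)
    have hfun : (((fun anchorIndex => pvBundleA (a :: b :: c :: rest) anchorIndex) ∘
        (fun k : Nat => (k : Int))) ∘ (· + 1)) = (fun j : Nat => pvG (c :: rest) j) := by
      funext j
      simp only [Function.comp_apply]
      rw [show ((j + 1 : Nat) : Int) = ((j : Int) + 1) by push_cast; ring, pvBundleA_succ]
    rw [head, hfun, pvG_groups k c rest hr]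
    simp [pvGroups]

-- ===== VERDICT (by name: the statement is the Claim_ definition above) =====
theorem cvsToAnchorGroups_spec : Claim_equal_cvsToAnchorGroups := by
  intro cvs _ hpre
  obtain ⟨h4, h3⟩ := hpre
  obtain ⟨k, hk⟩ : ∃ k, cvs.length = 3 * k + 4 := ⟨(cvs.length - 4) / 3, by omega⟩
  unfold Spec_cvsToAnchorGroups
  rw [pvA_eq_groups k cvs hk]
  unfold cvsToAnchorGroups_alt
  have hguard : ¬ ((cvs.length : Int) < 4 ∨ PySem.Int.mod ((cvs.length : Int) - 4) 3 ≠ 0) := by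
    push_neg
    refine ⟨by omega, ?_⟩
    rw [show ((cvs.length : Int) - 4) = ((3 * k : Nat) : Int) by rw [hk]; push_cast; ring]
    have hmod : PySem.Int.mod ((3 * k : Nat) : Int) ((3 : Nat) : Int) = ((3 * k % 3 : Nat) : Int) :=
      PySem.Int.mod_natCast (3 * k) 3
    simp only [Nat.cast_ofNat] at hmod
    rw [hmod]
    omega
  simp only [hguard, if_false]
  match cvs, hk with
  | a :: b :: c :: rest, hk =>
    rw [pvAltGo_eq_groups (k + 1) (a :: b :: c :: rest) [] [] 0 (by omega)
      (by simp only [List.length_cons] at hk ⊢; omega)]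
    simp
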